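-- pv_equiv track=rewrite | github.com/yairpi165/ha-jane-voice | custom_components/jane_conversation/memory/extraction_prompts.py | cap_exchanges
-- ===== SOURCE A (Python) =====
-- _MAX_CONTEXT_CHARS = 8000  # ~2000 tokens (Hebrew+English, 4 chars/token)
--
-- def cap_exchanges(exchanges: list[dict]) -> list[dict]:
--     """Keep most-recent exchanges whose combined text fits the cap.
--
--     A single exchange exceeding the cap is still included (latest turn never dropped).
--     """
--     total = 0
--     kept: list[dict] = []
--     for ex in reversed(exchanges):
--         size = len(ex.get("text", "")) + len(ex.get("response", ""))
--         if total + size > _MAX_CONTEXT_CHARS and kept: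
--             break
--         total += size
--         kept.append(ex)
--     return list(reversed(kept))
-- ===== SOURCE B (Python) =====
-- _MAX_CONTEXT_CHARS = 8000
--
-- def cap_exchanges(exchanges: list[dict]) -> list[dict]:
--     """Keep most-recent exchanges whose combined text fits the cap.
--
--     Subtractive strategy: total the sizes of all exchanges once, then walk
--     from the oldest end dropping exchanges (subtracting their size) while the
--     remaining total exceeds the cap, never dropping the last exchange.
--     """
--     total = sum(len(ex.get("text", "")) + len(ex.get("response", "")) for ex in exchanges)
--     i = 0
--     while i < len(exchanges) - 1 and total > _MAX_CONTEXT_CHARS: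
--         ex = exchanges[i]
--         total -= len(ex.get("text", "")) + len(ex.get("response", ""))
--         i += 1
--     return exchanges[i:]
-- ===== Notes on version B (the rewrite author's own statement) =====
-- stated objective: alternative
-- what changed: A accumulates sizes newest-first into a kept list with an early break and reverses; B totals all sizes in one pass, then walks from the oldest end subtracting sizes while the remainder exceeds the cap (never dropping the last exchange) and returns the tail slice.
import Mathlib
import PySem

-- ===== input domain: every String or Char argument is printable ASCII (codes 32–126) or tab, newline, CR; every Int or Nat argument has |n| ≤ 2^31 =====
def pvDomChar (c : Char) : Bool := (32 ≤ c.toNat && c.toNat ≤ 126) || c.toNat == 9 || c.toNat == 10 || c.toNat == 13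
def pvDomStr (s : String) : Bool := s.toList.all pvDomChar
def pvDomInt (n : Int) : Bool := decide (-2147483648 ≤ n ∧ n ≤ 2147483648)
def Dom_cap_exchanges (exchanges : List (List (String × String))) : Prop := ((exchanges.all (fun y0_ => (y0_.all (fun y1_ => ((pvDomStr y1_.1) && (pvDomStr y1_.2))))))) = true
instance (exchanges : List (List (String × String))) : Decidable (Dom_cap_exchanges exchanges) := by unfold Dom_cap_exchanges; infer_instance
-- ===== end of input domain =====

-- B totals all sizes once and then drops exchanges from the oldest end while the remainder
-- exceeds the cap (never dropping the last), instead of A's newest-first accumulate-and-break.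

-- size of one exchange: len(ex.get("text","")) + len(ex.get("response","")) (used verbatim by both Pythons)
def pvSize (ex : List (String × String)) : Int :=
  PySem.Str.len (PySem.Dict.getD ⟨ex⟩ "text" "") + PySem.Str.len (PySem.Dict.getD ⟨ex⟩ "response" "")

-- ===== PORT A =====
-- the 'for ex in reversed(exchanges): … break …' loop, state (total, kept)
def capLoopA : List (List (String × String)) → Int → List (List (String × String)) → List (List (String × String))
  | [], _, kept => kept
  | ex :: rest, total, kept =>
    let size := pvSize ex
    if total + size > 8000 ∧ kept ≠ [] then kept
    else capLoopA rest (total + size) (kept ++ [ex])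

def cap_exchanges (exchanges : List (List (String × String))) : List (List (String × String)) :=
  (capLoopA exchanges.reverse 0 []).reverse

-- ===== PORT B =====
-- the 'while i < len(exchanges)-1 and total > cap: total -= size(exchanges[i]); i += 1' loop,
-- on the remaining tail exchanges[i:] (i < len-1 ⇔ at least two elements remain)
def capLoopB : List (List (String × String)) → Int → List (List (String × String))
  | ex :: next :: rest, total =>
    if total > 8000 then capLoopB (next :: rest) (total - pvSize ex)
    else ex :: next :: rest
  | l, _ => l

def cap_exchanges_alt (exchanges : List (List (String × String))) : List (List (String × String)) :=
  capLoopB exchanges ((exchanges.map pvSize).sum)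

-- ===== PRECONDITION & SPEC =====
def Spec_cap_exchanges (exchanges : List (List (String × String))) (out : List (List (String × String))) : Prop := out = cap_exchanges_alt exchanges
instance (exchanges : List (List (String × String))) (out : List (List (String × String))) : Decidable (Spec_cap_exchanges exchanges out) := by unfold Spec_cap_exchanges; infer_instance

-- ===== CLAIM (what is proved, stated in full; the proofs are below) =====
def Claim_equal_cap_exchanges : Prop := ∀ (exchanges : List (List (String × String))), Dom_cap_exchanges exchanges → Spec_cap_exchanges exchanges (cap_exchanges exchanges)

-- ===== LEMMAS AND PROOFS =====

theorem pvSize_nonneg (ex : List (String × String)) : 0 ≤ pvSize ex := by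
  simp [pvSize, PySem.Str.len_eq]
  positivity

def sumSz (l : List (List (String × String))) : Int := (l.map pvSize).sum

theorem sumSz_nonneg (l : List (List (String × String))) : 0 ≤ sumSz l := by
  apply List.sum_nonneg
  intro x hx
  simp only [List.mem_map] at hx
  obtain ⟨e, _, rfl⟩ := hx
  exact pvSize_nonneg e

theorem sumSz_reverse (l : List (List (String × String))) : sumSz l.reverse = sumSz l := by
  simp [sumSz]

-- the reference function both ports compute: keep the whole list while it fits (or is a
-- singleton), otherwise drop the oldest exchange and repeat
def best : List (List (String × String)) → List (List (String × String))
  | [] => []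
  | x :: rest => if sumSz (x :: rest) ≤ 8000 ∨ rest = [] then x :: rest else best rest

theorem best_full (l : List (List (String × String))) (h : sumSz l ≤ 8000) : best l = l := by
  cases l with
  | nil => rfl
  | cons x rest => simp [best, h]

-- how many leading exchanges of l A keeps, starting from accumulated size `total`
def keepCount : List (List (String × String)) → Int → Nat
  | [], _ => 0
  | ex :: rest, total =>
    if total + pvSize ex > 8000 then 0 else 1 + keepCount rest (total + pvSize ex)

theorem keepCount_le (l : List (List (String × String))) : ∀ total, keepCount l total ≤ l.length := by
  induction l with
  | nil => intro total; simp [keepCount]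
  | cons ex rest ih =>
    intro total
    simp only [keepCount, List.length_cons]
    split
    · omega
    · have := ih (total + pvSize ex); omega

theorem keepCount_full (l : List (List (String × String))) :
    ∀ total, total + sumSz l ≤ 8000 → keepCount l total = l.length := by
  induction l with
  | nil => intro total _; simp [keepCount]
  | cons ex rest ih =>
    intro total h
    have hr := sumSz_nonneg rest
    have hsum : sumSz (ex :: rest) = pvSize ex + sumSz rest := by simp [sumSz]
    simp only [keepCount, List.length_cons]
    rw [if_neg (by rw [hsum] at h; omega), ih (total + pvSize ex) (by rw [hsum] at h; omega)]
    omega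

theorem keepCount_full_rev (l : List (List (String × String))) :
    ∀ total, l ≠ [] → keepCount l total = l.length → total + sumSz l ≤ 8000 := by
  induction l with
  | nil => intro _ h; exact absurd rfl h
  | cons ex rest ih =>
    intro total _ h
    have hsum : sumSz (ex :: rest) = pvSize ex + sumSz rest := by simp [sumSz]
    simp only [keepCount, List.length_cons] at h
    by_cases hb : total + pvSize ex > 8000
    · rw [if_pos hb] at h; omega
    · rw [if_neg hb] at h
      by_cases hr : rest = []
      · subst hr; simp [sumSz] at *; omega
      · have := ih (total + pvSize ex) hr (by omega)
        rw [hsum]; omega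

theorem keepCount_append (r r2 : List (List (String × String))) :
    ∀ total, keepCount (r ++ r2) total =
      if keepCount r total = r.length then r.length + keepCount r2 (total + sumSz r)
      else keepCount r total := by
  induction r with
  | nil => intro total; simp [keepCount, sumSz]
  | cons ex rest ih =>
    intro total
    simp only [List.cons_append, keepCount, List.length_cons]
    have hsum : sumSz (ex :: rest) = pvSize ex + sumSz rest := by simp [sumSz]
    by_cases hb : total + pvSize ex > 8000
    · rw [if_pos hb, if_pos hb, if_neg (by omega)]
    · rw [if_neg hb, if_neg hb, ih (total + pvSize ex)]
      have hle := keepCount_le rest (total + pvSize ex)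
      by_cases hk : keepCount rest (total + pvSize ex) = rest.length
      · rw [if_pos hk, if_pos (by omega), hsum]
        ring_nf
      · rw [if_neg hk, if_neg (by omega)]

-- the loop of A, with kept ≠ [], appends exactly take (keepCount …)
theorem capLoopA_eq_take (l : List (List (String × String))) :
    ∀ total kept, kept ≠ [] → capLoopA l total kept = kept ++ l.take (keepCount l total) := by
  induction l with
  | nil => intro total kept _; simp [capLoopA, keepCount]
  | cons ex rest ih =>
    intro total kept hk
    simp only [capLoopA, keepCount]
    by_cases h : total + pvSize ex > 8000
    · simp [h, hk]
    · have hcond : ¬(total + pvSize ex > 8000 ∧ kept ≠ []) := fun hc => h hc.1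
      rw [if_neg hcond, ih (total + pvSize ex) (kept ++ [ex]) (by simp)]
      rw [if_neg h, Nat.add_comm 1, List.take_succ_cons]
      simp

theorem capA_char (l : List (List (String × String))) (y : List (String × String))
    (r' : List (List (String × String))) (h : l.reverse = y :: r') :
    cap_exchanges l = (y :: r'.take (keepCount r' (0 + pvSize y))).reverse := by
  simp only [cap_exchanges, h, capLoopA]
  rw [if_neg (by simp), capLoopA_eq_take _ _ _ (by simp)]
  simp

theorem capA_eq_best (l : List (List (String × String))) : cap_exchanges l = best l := by
  induction l with
  | nil => simp [cap_exchanges, capLoopA, best]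
  | cons x rest ih =>
    cases hrr : rest.reverse with
    | nil =>
      have hre : rest = [] := by
        have := congrArg List.reverse hrr; simpa using this
      subst hre
      rw [capA_char [x] x [] (by simp)]
      simp [keepCount, best]
    | cons y r'' =>
      have hrne : rest ≠ [] := by intro h; subst h; simp at hrr
      have hrest : rest = (y :: r'').reverse := by
        have := congrArg List.reverse hrr; simpa using this
      have hlr : (x :: rest).reverse = y :: (r'' ++ [x]) := by
        simp [hrr]
      rw [capA_char _ y (r'' ++ [x]) hlr]
      rw [keepCount_append]
      have hsr : sumSz rest = pvSize y + sumSz r'' := by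
        rw [hrest, sumSz_reverse]; simp [sumSz]
      have hsl : sumSz (x :: rest) = pvSize x + sumSz rest := by simp [sumSz]
      have hx0 := pvSize_nonneg x
      by_cases hK : keepCount r'' (0 + pvSize y) = r''.length
      · rw [if_pos hK]
        by_cases hfit : 0 + pvSize y + sumSz r'' + pvSize x ≤ 8000
        · -- everything fits: both sides are the whole list
          have hcnt1 : keepCount [x] (0 + pvSize y + sumSz r'') = 1 := by
            simp only [keepCount]
            rw [if_neg (by omega)]
          rw [hcnt1]
          have htake : (r'' ++ [x]).take (r''.length + 1) = r'' ++ [x] := by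
            apply List.take_of_length_le; simp
          rw [htake]
          have hfull : best (x :: rest) = x :: rest := by
            apply best_full; rw [hsl, hsr]; omega
          rw [hfull]
          calc (y :: (r'' ++ [x])).reverse = x :: (y :: r'').reverse := by simp
            _ = x :: rest := by rw [← hrest]
        · -- rest fits (or is singleton) but adding x overflows: result is rest
          have hcnt0 : keepCount [x] (0 + pvSize y + sumSz r'') = 0 := by
            simp only [keepCount]
            rw [if_pos (by omega)]
          rw [hcnt0, Nat.add_zero]
          have htake : (r'' ++ [x]).take r''.length = r'' := by
            rw [List.take_append_of_le_length (le_refl _), List.take_length]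
          rw [htake]
          have hover : ¬ sumSz (x :: rest) ≤ 8000 := by
            rw [hsl, hsr]; omega
          have hbest : best (x :: rest) = best rest := by
            simp only [best]
            rw [if_neg (by simp only [not_or]; exact ⟨hover, hrne⟩)]
          rw [hbest]
          have hbr : best rest = rest := by
            by_cases hr0 : r'' = []
            · subst hr0
              rw [hrest]; simp [best]
            · have := keepCount_full_rev r'' (0 + pvSize y) hr0 hK
              apply best_full; rw [hsr]; omega
          rw [hbr, hrest]
      · -- break inside r'': same result as on rest
        rw [if_neg hK]
        have hlt : keepCount r'' (0 + pvSize y) < r''.length :=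
          lt_of_le_of_ne (keepCount_le _ _) hK
        have htake : (r'' ++ [x]).take (keepCount r'' (0 + pvSize y)) =
            r''.take (keepCount r'' (0 + pvSize y)) :=
          List.take_append_of_le_length (le_of_lt hlt)
        rw [htake, ← capA_char rest y r'' hrr, ih]
        have hoverrest : ¬ sumSz rest ≤ 8000 := by
          intro hle
          exact hK (keepCount_full r'' (0 + pvSize y) (by rw [hsr] at hle; omega))
        have hover : ¬ sumSz (x :: rest) ≤ 8000 := by
          rw [hsl]; omega
        simp only [best]
        rw [if_neg (by simp only [not_or]; exact ⟨hover, hrne⟩)]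

theorem capB_eq_best (l : List (List (String × String))) : capLoopB l (sumSz l) = best l := by
  induction l with
  | nil => rfl
  | cons x rest ih =>
    cases rest with
    | nil => simp [capLoopB, best]
    | cons y r =>
      have hsub : sumSz (x :: y :: r) - pvSize x = sumSz (y :: r) := by
        simp [sumSz]
      simp only [capLoopB, best]
      by_cases h : sumSz (x :: y :: r) > 8000
      · rw [if_pos h, if_neg (by simp only [not_or]; exact ⟨by omega, by simp⟩), hsub, ih]
        simp only [best]
      · rw [if_neg h, if_pos (Or.inl (by omega))]

-- ===== VERDICT (by name: the statement is the Claim_ definition above) =====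
theorem cap_exchanges_spec : Claim_equal_cap_exchanges := by
  intro exchanges _
  unfold Spec_cap_exchanges cap_exchanges_alt
  rw [capA_eq_best]
  exact (capB_eq_best exchanges).symm
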